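-- pv_equiv track=rewrite | github.com/sasen-git/vhh-designer | archive/designer/vhh_designer_v7_2.1.py | get_cdr3_features
-- ===== SOURCE A (Python) =====
-- from typing import Dict, List, Tuple, Optional, Set
--
-- def get_cdr3_features(cdr3: str) -> Dict[str, str]:
--     """Extract CDR3 features for rule matching."""
--     length = len(cdr3)
--
--     # Length category
--     if length <= 8:
--         cdr3_len = "short"
--     elif length <= 14:
--         cdr3_len = "medium"
--     else:
--         cdr3_len = "long"
--
--     # Charge
--     pos_charge = sum(1 for aa in cdr3 if aa in "RKH")
--     neg_charge = sum(1 for aa in cdr3 if aa in "DE")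
--     net_charge = pos_charge - neg_charge
--
--     if net_charge >= 2:
--         cdr3_charge = "positive"
--     elif net_charge <= -2:
--         cdr3_charge = "negative"
--     else:
--         cdr3_charge = "neutral"
--
--     # Cysteine
--     n_cys = cdr3.count("C")
--     if n_cys == 0:
--         cdr3_cys = "none"
--     elif n_cys == 1:
--         cdr3_cys = "one"
--     else:
--         cdr3_cys = "multiple"
--
--     # Terminal residues
--     cdr3_end = cdr3[-3:] if len(cdr3) >= 3 else cdr3
--     cdr3_last = cdr3[-1] if cdr3 else ""
--
--     return {
--         "cdr3_len": cdr3_len,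
--         "cdr3_charge": cdr3_charge,
--         "cdr3_cys": cdr3_cys,
--         "cdr3_end": cdr3_end,
--         "cdr3[-1]": cdr3_last,
--         "cdr3[-2]": cdr3[-2] if len(cdr3) >= 2 else "",
--         "cdr3[-3]": cdr3[-3] if len(cdr3) >= 3 else "",
--     }
-- ===== SOURCE B (Python) =====
-- CHARGE = {"R": 1, "K": 1, "H": 1, "D": -1, "E": -1}
--
-- def _bucket(x, cuts, default):
--     for bound, label in cuts:
--         if x <= bound:
--             return label
--     return default
--
-- def get_cdr3_features(cdr3: str):
--     """One pass accumulating net charge via a delta table and a cysteine count;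
--     categories via a generic threshold-table helper; terminals via guard-free slices."""
--     net = 0
--     cys = 0
--     for aa in cdr3:
--         net += CHARGE.get(aa, 0)
--         cys += aa == "C"
--     return {
--         "cdr3_len": _bucket(len(cdr3), [(8, "short"), (14, "medium")], "long"),
--         "cdr3_charge": _bucket(net, [(-2, "negative"), (1, "neutral")], "positive"),
--         "cdr3_cys": _bucket(cys, [(0, "none"), (1, "one")], "multiple"),
--         "cdr3_end": cdr3[-3:],
--         "cdr3[-1]": cdr3[-1:],
--         "cdr3[-2]": cdr3[-2:-1],
--         "cdr3[-3]": cdr3[-3:-2],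
--     }
-- ===== Notes on version B (the rewrite author's own statement) =====
-- stated objective: alternative
-- what changed: B replaces A's three scans and three if/elif chains with one pass that accumulates the net charge directly via a signed delta table plus a cysteine counter, classifies all three categorical features through a single generic threshold-table helper, and replaces A's four len-guarded terminal-residue expressions with guard-free slices (cdr3[-3:], cdr3[-1:], cdr3[-2:-1], cdr3[-3:-2]).
import Mathlib
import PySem

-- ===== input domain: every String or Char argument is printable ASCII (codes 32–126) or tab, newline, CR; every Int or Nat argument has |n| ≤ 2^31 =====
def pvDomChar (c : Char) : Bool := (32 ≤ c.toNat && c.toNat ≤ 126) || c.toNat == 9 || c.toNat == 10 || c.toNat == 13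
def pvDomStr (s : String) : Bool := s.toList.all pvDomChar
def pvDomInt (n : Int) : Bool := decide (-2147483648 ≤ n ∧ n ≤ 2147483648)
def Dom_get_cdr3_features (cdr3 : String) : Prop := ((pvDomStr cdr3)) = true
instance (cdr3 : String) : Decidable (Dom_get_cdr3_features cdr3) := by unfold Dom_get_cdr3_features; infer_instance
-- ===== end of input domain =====

-- B accumulates net charge via a signed delta table plus a cysteine count in one pass, classifies all three categories via a generic threshold-table helper, and replaces A's len-guarded terminal expressions with guard-free slices; objective: alternative decomposition, same cost.


-- ===== PORT A =====
def get_cdr3_features (cdr3 : String) : List (String × String) :=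
  let length : Int := PySem.Str.len cdr3
  let cdr3_len : String :=
    if length ≤ 8 then "short" else if length ≤ 14 then "medium" else "long"
  -- sum(1 for aa in cdr3 if aa in "RKH")  (single-char membership = list membership)
  let pos_charge : Int := ((cdr3.toList.filter (fun aa => PySem.Chars.isIn [aa] "RKH".toList)).length : Int)
  let neg_charge : Int := ((cdr3.toList.filter (fun aa => PySem.Chars.isIn [aa] "DE".toList)).length : Int)
  let net_charge : Int := pos_charge - neg_charge
  let cdr3_charge : String :=
    if net_charge ≥ 2 then "positive" else if net_charge ≤ -2 then "negative" else "neutral"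
  let n_cys : Nat := PySem.Str.count cdr3 "C"
  let cdr3_cys : String :=
    if n_cys = 0 then "none" else if n_cys = 1 then "one" else "multiple"
  let cdr3_end : String :=
    if PySem.Str.len cdr3 ≥ 3 then PySem.Str.slice cdr3 (some (-3)) none else cdr3
  let cdr3_last : String :=
    if cdr3.toList ≠ [] then (PySem.Str.pyGet? cdr3 (-1)).elim "" (fun c => String.ofList [c]) else ""
  [("cdr3_len", cdr3_len), ("cdr3_charge", cdr3_charge), ("cdr3_cys", cdr3_cys),
   ("cdr3_end", cdr3_end), ("cdr3[-1]", cdr3_last),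
   ("cdr3[-2]", if PySem.Str.len cdr3 ≥ 2 then (PySem.Str.pyGet? cdr3 (-2)).elim "" (fun c => String.ofList [c]) else ""),
   ("cdr3[-3]", if PySem.Str.len cdr3 ≥ 3 then (PySem.Str.pyGet? cdr3 (-3)).elim "" (fun c => String.ofList [c]) else "")]

-- ===== PORT B =====
-- CHARGE = {"R": 1, "K": 1, "H": 1, "D": -1, "E": -1}
def pvCharge : PySem.Dict Char Int :=
  PySem.Dict.ofList [('R', 1), ('K', 1), ('H', 1), ('D', -1), ('E', -1)]

-- loop body: net += CHARGE.get(aa, 0); cys += aa == "C"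
def pvScanStep (st : Int × Int) (aa : Char) : Int × Int :=
  (st.1 + pvCharge.getD aa 0, st.2 + (if aa = 'C' then 1 else 0))

-- _bucket(x, cuts, default): first label whose bound x does not exceed, else default
def pvBucket (x : Int) : List (Int × String) → String → String
  | [], dflt => dflt
  | (bound, label) :: rest, dflt => if x ≤ bound then label else pvBucket x rest dflt

def get_cdr3_features_alt (cdr3 : String) : List (String × String) :=
  let st := cdr3.toList.foldl pvScanStep (0, 0)
  [("cdr3_len", pvBucket (PySem.Str.len cdr3) [(8, "short"), (14, "medium")] "long"),
   ("cdr3_charge", pvBucket st.1 [(-2, "negative"), (1, "neutral")] "positive"),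
   ("cdr3_cys", pvBucket st.2 [(0, "none"), (1, "one")] "multiple"),
   ("cdr3_end", PySem.Str.slice cdr3 (some (-3)) none),
   ("cdr3[-1]", PySem.Str.slice cdr3 (some (-1)) none),
   ("cdr3[-2]", PySem.Str.slice cdr3 (some (-2)) (some (-1))),
   ("cdr3[-3]", PySem.Str.slice cdr3 (some (-3)) (some (-2)))]

-- ===== PRECONDITION & SPEC =====
def Spec_get_cdr3_features (cdr3 : String) (out : List (String × String)) : Prop := out = get_cdr3_features_alt cdr3
instance (cdr3 : String) (out : List (String × String)) : Decidable (Spec_get_cdr3_features cdr3 out) := by unfold Spec_get_cdr3_features; infer_instance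

-- ===== CLAIM (what is proved, stated in full; the proofs are below) =====
def Claim_equal_get_cdr3_features : Prop := ∀ (cdr3 : String), Dom_get_cdr3_features cdr3 → Spec_get_cdr3_features cdr3 (get_cdr3_features cdr3)

-- ===== LEMMAS AND PROOFS =====

-- Python's "aa in 'RKH'" on a single character is list membership
theorem pvIsIn_singleton (a : Char) (l : List Char) : PySem.Chars.isIn [a] l = decide (a ∈ l) := by
  cases h : decide (a ∈ l)
  · rw [PySem.Chars.isIn_eq_false_iff, List.singleton_infix_iff]
    simpa using h
  · rw [PySem.Chars.isIn_iff_infix, List.singleton_infix_iff]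
    simpa using h

-- cdr3.count("C") (non-overlapping substring count) counts the 'C' characters
theorem pvGoC (fuel : Nat) (s : List Char) (acc : Nat) (h : s.length ≤ fuel) :
    PySem.Chars.count.go ['C'] fuel s acc = acc + (s.filter (fun aa => aa = 'C')).length := by
  induction fuel generalizing s acc with
  | zero =>
    cases s with
    | nil => simp [PySem.Chars.count.go]
    | cons a t => simp at h
  | succ f ih =>
    cases s with
    | nil => simp [PySem.Chars.count.go]
    | cons a t =>
      have hlen : t.length ≤ f := by simp at h; omega
      rw [PySem.Chars.count.go]
      by_cases ha : a = 'C'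
      · subst ha
        simp [ih t (acc + 1) hlen]
        omega
      · simp [ha, Ne.symm ha, ih t acc hlen]

theorem pvCountC (cs : List Char) :
    PySem.Chars.count cs ['C'] = (cs.filter (fun aa => aa = 'C')).length := by
  rw [PySem.Chars.count]
  simp [pvGoC cs.length cs 0 le_rfl]

-- the delta-table lookup, character by character
theorem pvCharge_getD (aa : Char) :
    pvCharge.getD aa 0 =
      if aa = 'R' ∨ aa = 'K' ∨ aa = 'H' then 1
      else if aa = 'D' ∨ aa = 'E' then -1 else 0 := by
  by_cases hR : aa = 'R' <;> by_cases hK : aa = 'K' <;> by_cases hH : aa = 'H' <;>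
    by_cases hD : aa = 'D' <;> by_cases hE : aa = 'E' <;>
    simp_all [pvCharge, PySem.Dict.ofList, PySem.Dict.update, PySem.Dict.getD_insert,
      PySem.Dict.getD_empty]

-- B's single fold computes A's net charge and cysteine count
theorem pvFold_eq (cs : List Char) (p c : Int) :
    cs.foldl pvScanStep (p, c) =
      (p + ((cs.filter (fun aa => PySem.Chars.isIn [aa] "RKH".toList)).length : Int)
         - ((cs.filter (fun aa => PySem.Chars.isIn [aa] "DE".toList)).length : Int),
       c + ((cs.filter (fun aa => aa = 'C')).length : Int)) := by
  induction cs generalizing p c with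
  | nil => simp
  | cons a tl ih =>
    simp only [List.foldl_cons, pvScanStep, pvCharge_getD, List.filter_cons]
    rw [ih]
    by_cases h1 : a = 'R' ∨ a = 'K' ∨ a = 'H'
    · have h2 : ¬ (a = 'D' ∨ a = 'E') := by rcases h1 with h|h|h <;> subst h <;> decide
      have h3 : ¬ a = 'C' := by rcases h1 with h|h|h <;> subst h <;> decide
      simp [h1, h2, h3, pvIsIn_singleton, Prod.ext_iff]
      omega
    · by_cases h2 : a = 'D' ∨ a = 'E'
      · have h3 : ¬ a = 'C' := by rcases h2 with h|h <;> subst h <;> decide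
        simp [h1, h2, h3, pvIsIn_singleton, Prod.ext_iff]
        omega
      · by_cases h3 : a = 'C'
        · simp [h3, pvIsIn_singleton, Prod.ext_iff]
          omega
        · simp [h1, h2, h3, pvIsIn_singleton]

-- slice and indexing facts for the terminal residues
theorem pvSliceMid (l : List Char) (h : 2 ≤ l.length) :
    PySem.List.slice l (some (-2)) (some (-1)) = [l[l.length - 2]] := by
  simp only [PySem.List.slice]
  rw [PySem.List.clampIdx_neg_ofNat _ 2 (by omega), PySem.List.clampIdx_neg_one]
  rw [show l.length - 1 - (l.length - 2) = 1 from by omega]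
  rw [List.drop_eq_getElem_cons (by omega), List.take_succ_cons, List.take_zero]

theorem pvSliceMid0 (l : List Char) (h : l.length ≤ 1) :
    PySem.List.slice l (some (-2)) (some (-1)) = [] := by
  simp only [PySem.List.slice]
  rw [PySem.List.clampIdx_neg_ofNat _ 2 (by omega), PySem.List.clampIdx_neg_one]
  rw [show l.length - 1 - (l.length - 2) = 0 from by omega]
  simp

theorem pvSlice3 (l : List Char) (h : 3 ≤ l.length) :
    PySem.List.slice l (some (-3)) (some (-2)) = [l[l.length - 3]] := by
  simp only [PySem.List.slice]
  rw [PySem.List.clampIdx_neg_ofNat _ 3 (by omega), PySem.List.clampIdx_neg_ofNat _ 2 (by omega)]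
  rw [show l.length - 2 - (l.length - 3) = 1 from by omega]
  rw [List.drop_eq_getElem_cons (by omega), List.take_succ_cons, List.take_zero]

theorem pvSlice30 (l : List Char) (h : l.length ≤ 2) :
    PySem.List.slice l (some (-3)) (some (-2)) = [] := by
  simp only [PySem.List.slice]
  rw [PySem.List.clampIdx_neg_ofNat _ 3 (by omega), PySem.List.clampIdx_neg_ofNat _ 2 (by omega)]
  rw [show l.length - 2 - (l.length - 3) = 0 from by omega]
  simp

-- A's guarded "cdr3[-3:] if len >= 3 else cdr3" is B's unconditional cdr3[-3:]
theorem pvEndEq (s : String) :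
    (if PySem.Str.len s ≥ 3 then PySem.Str.slice s (some (-3)) none else s) =
    PySem.Str.slice s (some (-3)) none := by
  by_cases h : PySem.Str.len s ≥ 3
  · rw [if_pos h]
  · rw [if_neg h]
    apply String.toList_inj.mp
    simp only [PySem.Str.toList_slice, PySem.Chars.slice_eq_listSlice]
    rw [PySem.List.slice_from_neg_ofNat _ 3 (by omega)]
    simp only [PySem.Str.len_eq] at h
    rw [show s.toList.length - 3 = 0 from by omega, List.drop_zero]

-- A's guarded "cdr3[-1] if cdr3 else ''" is B's cdr3[-1:]
theorem pvLastEq (s : String) :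
    (if s.toList ≠ [] then (PySem.Str.pyGet? s (-1)).elim "" (fun c => String.ofList [c]) else "") =
    PySem.Str.slice s (some (-1)) none := by
  apply String.toList_inj.mp
  by_cases h : s.toList = []
  · simp [h, PySem.Str.toList_slice, PySem.Chars.slice_eq_listSlice, PySem.List.slice_from_neg_one]
  · have hlen : 1 ≤ s.toList.length := List.length_pos_iff.mpr h
    simp only [h, ne_eq, not_false_iff, if_true, PySem.Str.pyGet?_eq,
      PySem.Chars.pyGet?_eq_listPyGet?]
    rw [PySem.List.pyGet?_neg_ofNat _ 1 (by omega) (by omega)]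
    simp only [PySem.Str.toList_slice, PySem.Chars.slice_eq_listSlice,
      PySem.List.slice_from_neg_one]
    rw [List.getElem?_eq_getElem (by omega)]
    simp only [Option.elim_some, String.toList_ofList]
    have hsl : s.toList.length = s.length := by simp
    rw [List.drop_eq_getElem_cons (by omega), List.drop_eq_nil_of_le (by omega)]

-- A's guarded "cdr3[-2] if len >= 2 else ''" is B's cdr3[-2:-1]
theorem pvAt2Eq (s : String) :
    (if PySem.Str.len s ≥ 2 then (PySem.Str.pyGet? s (-2)).elim "" (fun c => String.ofList [c]) else "") =
    PySem.Str.slice s (some (-2)) (some (-1)) := by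
  apply String.toList_inj.mp
  by_cases h : PySem.Str.len s ≥ 2
  · have h2 : 2 ≤ s.toList.length := by simp only [PySem.Str.len_eq] at h; omega
    rw [if_pos h]
    simp only [PySem.Str.pyGet?_eq, PySem.Chars.pyGet?_eq_listPyGet?]
    rw [PySem.List.pyGet?_neg_ofNat _ 2 (by omega) (by omega)]
    rw [List.getElem?_eq_getElem (by omega)]
    simp only [Option.elim_some, String.toList_ofList, PySem.Str.toList_slice,
      PySem.Chars.slice_eq_listSlice]
    rw [pvSliceMid _ h2]
  · have h2 : s.toList.length ≤ 1 := by simp only [PySem.Str.len_eq] at h; omega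
    rw [if_neg h]
    simp only [PySem.Str.toList_slice, PySem.Chars.slice_eq_listSlice]
    rw [pvSliceMid0 _ h2]
    simp

-- A's guarded "cdr3[-3] if len >= 3 else ''" is B's cdr3[-3:-2]
theorem pvAt3Eq (s : String) :
    (if PySem.Str.len s ≥ 3 then (PySem.Str.pyGet? s (-3)).elim "" (fun c => String.ofList [c]) else "") =
    PySem.Str.slice s (some (-3)) (some (-2)) := by
  apply String.toList_inj.mp
  by_cases h : PySem.Str.len s ≥ 3
  · have h3 : 3 ≤ s.toList.length := by simp only [PySem.Str.len_eq] at h; omega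
    rw [if_pos h]
    simp only [PySem.Str.pyGet?_eq, PySem.Chars.pyGet?_eq_listPyGet?]
    rw [PySem.List.pyGet?_neg_ofNat _ 3 (by omega) (by omega)]
    rw [List.getElem?_eq_getElem (by omega)]
    simp only [Option.elim_some, String.toList_ofList, PySem.Str.toList_slice,
      PySem.Chars.slice_eq_listSlice]
    rw [pvSlice3 _ h3]
  · have h3 : s.toList.length ≤ 2 := by simp only [PySem.Str.len_eq] at h; omega
    rw [if_neg h]
    simp only [PySem.Str.toList_slice, PySem.Chars.slice_eq_listSlice]
    rw [pvSlice30 _ h3]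
    simp

-- ===== VERDICT (by name: the statement is the Claim_ definition above) =====
theorem get_cdr3_features_spec : Claim_equal_get_cdr3_features := by
  intro cdr3 _
  unfold Spec_get_cdr3_features get_cdr3_features get_cdr3_features_alt
  rw [pvFold_eq]
  have hcnt : PySem.Str.count cdr3 "C" = (cdr3.toList.filter (fun aa => aa = 'C')).length := by
    rw [PySem.Str.count_eq, show "C".toList = ['C'] from rfl, pvCountC]
  simp only [pvBucket, pvEndEq, pvLastEq, pvAt2Eq, pvAt3Eq]
  split_ifs <;> first | rfl | omega
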